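-- pv_equiv track=rewrite | github.com/algoritmiaUS/ada-byron | 2026/regional-andaluza/H/code/pablo.py | solve
-- ===== SOURCE A (Python) =====
-- def solve(c: int, s: str) -> str:
--     inside = 0
--     valid = True
--
--     for ch in s:
--         if ch == 'E':
--             inside += 1
--             if inside > c:
--                 valid = False
--                 break
--         else:  # ch == 'S'
--             if inside == 0:
--                 valid = False
--                 break
--             inside -= 1
--
--     if valid and inside == 0:
--         return "VALIDO"
--     else:
--         return "INVALIDO"
-- ===== SOURCE B (Python) =====
-- def solve(c: int, s: str) -> str:
--     # build the table of running prefix sums (+1 for 'E', -1 otherwise), then reduce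
--     prefixes = []
--     total = 0
--     for ch in s:
--         total += 1 if ch == 'E' else -1
--         prefixes.append(total)
--     ok = all(0 <= p <= c for p in prefixes) and (not prefixes or prefixes[-1] == 0)
--     return "VALIDO" if ok else "INVALIDO"
-- ===== Notes on version B (the rewrite author's own statement) =====
-- stated objective: simpler
-- what changed: Replaced the early-exit counter loop carrying a valid flag with a build-then-reduce decomposition: build the list of running prefix sums, then decide validity by a single all/last check (every prefix in [0,c] and the final sum is 0).
import Mathlib
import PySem

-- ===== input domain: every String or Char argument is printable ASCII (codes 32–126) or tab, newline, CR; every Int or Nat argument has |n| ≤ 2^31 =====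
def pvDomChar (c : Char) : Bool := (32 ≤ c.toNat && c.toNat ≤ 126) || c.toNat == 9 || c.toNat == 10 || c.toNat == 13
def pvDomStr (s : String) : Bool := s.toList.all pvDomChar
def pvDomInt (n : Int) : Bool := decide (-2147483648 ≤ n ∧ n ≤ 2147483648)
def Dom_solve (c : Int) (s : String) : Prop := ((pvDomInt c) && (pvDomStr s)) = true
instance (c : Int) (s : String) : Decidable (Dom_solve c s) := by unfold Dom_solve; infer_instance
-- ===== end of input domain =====

-- B replaces A's early-exit counter loop with build-prefix-sums-then-reduce (objective: simpler decomposition).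

-- ===== PORT A =====
-- the for-loop with break: returns (inside, valid)
def solveLoop (c : Int) : List Char → Int → Int × Bool
  | [], inside => (inside, true)
  | ch :: rest, inside =>
    if ch = 'E' then
      if inside + 1 > c then (inside + 1, false)
      else solveLoop c rest (inside + 1)
    else
      if inside = 0 then (inside, false)
      else solveLoop c rest (inside - 1)

def solve (c : Int) (s : String) : String :=
  let r := solveLoop c s.toList 0
  if r.2 && r.1 == 0 then "VALIDO" else "INVALIDO"

-- ===== PORT B =====
-- the prefix-sum table built by B's loop
def prefixesB : List Char → Int → List Int
  | [], _ => []
  | ch :: rest, total =>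
    let total' := total + (if ch = 'E' then 1 else -1)
    total' :: prefixesB rest total'

def solve_alt (c : Int) (s : String) : String :=
  let prefs := prefixesB s.toList 0
  let ok := prefs.all (fun p => decide (0 ≤ p ∧ p ≤ c)) && (prefs.isEmpty || prefs.getLast? == some 0)
  if ok then "VALIDO" else "INVALIDO"

-- ===== PRECONDITION & SPEC =====
def Spec_solve (c : Int) (s : String) (out : String) : Prop := out = solve_alt c s
instance (c : Int) (s : String) (out : String) : Decidable (Spec_solve c s out) := by unfold Spec_solve; infer_instance

-- ===== CLAIM (what is proved, stated in full; the proofs are below) =====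
def Claim_equal_solve : Prop := ∀ (c : Int) (s : String), Dom_solve c s → Spec_solve c s (solve c s)

-- ===== LEMMAS AND PROOFS =====

-- loop invariant: the break-loop's valid flag equals "all prefixes in [0,c]", and on success
-- the final counter is the last prefix (default p for the empty tail)
theorem solveLoop_char (c : Int) : ∀ (l : List Char) (p : Int), 0 ≤ p → (p = 0 ∨ p ≤ c) →
    (solveLoop c l p).2 = ((prefixesB l p).all (fun q => decide (0 ≤ q ∧ q ≤ c))) ∧
    ((solveLoop c l p).2 = true → (solveLoop c l p).1 = (prefixesB l p).getLastD p) := by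
  intro l
  induction l with
  | nil => intro p hp _; simp [solveLoop, prefixesB]
  | cons ch rest ih =>
    intro p hp hpc
    by_cases hE : ch = 'E'
    · subst hE
      have hpre : prefixesB ('E' :: rest) p = (p + 1) :: prefixesB rest (p + 1) := by
        simp [prefixesB]
      by_cases hbr : p + 1 > c
      · have hloop : solveLoop c ('E' :: rest) p = (p + 1, false) := by
          simp [solveLoop, hbr]
        constructor
        · rw [hloop, hpre]
          simp only [List.all_cons]
          rw [decide_eq_false (by omega), Bool.false_and]
        · intro hv; rw [hloop] at hv; simp at hv
      · have hloop : solveLoop c ('E' :: rest) p = solveLoop c rest (p + 1) := by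
          simp [solveLoop, hbr]
        have h1 : (0:Int) ≤ p + 1 := by omega
        obtain ⟨h2, h3⟩ := ih (p + 1) h1 (Or.inr (by omega))
        constructor
        · rw [hloop, h2, hpre]
          simp only [List.all_cons]
          rw [decide_eq_true ⟨h1, by omega⟩, Bool.true_and]
        · intro hv
          rw [hloop] at hv ⊢
          rw [h3 hv, hpre, List.getLastD_cons]
    · have hpre : prefixesB (ch :: rest) p = (p - 1) :: prefixesB rest (p - 1) := by
        simp [prefixesB, hE, sub_eq_add_neg]
      by_cases hz : p = 0
      · subst hz
        have hloop : solveLoop c (ch :: rest) 0 = (0, false) := by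
          simp [solveLoop, hE]
        constructor
        · rw [hloop, hpre]
          simp only [List.all_cons]
          rw [decide_eq_false (by omega), Bool.false_and]
        · intro hv; rw [hloop] at hv; simp at hv
      · have hloop : solveLoop c (ch :: rest) p = solveLoop c rest (p - 1) := by
          simp [solveLoop, hE, hz]
        have hplec : p ≤ c := hpc.resolve_left hz
        have h1 : (0:Int) ≤ p - 1 := by omega
        obtain ⟨h2, h3⟩ := ih (p - 1) h1 (Or.inr (by omega))
        constructor
        · rw [hloop, h2, hpre]
          simp only [List.all_cons]
          rw [decide_eq_true ⟨h1, by omega⟩, Bool.true_and]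
        · intro hv
          rw [hloop] at hv ⊢
          rw [h3 hv, hpre, List.getLastD_cons]

-- the reduce side: "last prefix (default 0) is 0" as B's boolean
theorem getLastD_zero_bool (l : List Int) :
    ((l.getLastD 0 == 0) : Bool) = (l.isEmpty || l.getLast? == some 0) := by
  cases hg : l.getLast? with
  | none =>
    have hnil : l = [] := List.getLast?_eq_none_iff.mp hg
    subst hnil; simp
  | some x =>
    have hne : l ≠ [] := by intro h; subst h; simp at hg
    simp [List.getLastD_eq_getLast?, hg, List.isEmpty_eq_false_iff.mpr hne]

-- ===== VERDICT (by name: the statement is the Claim_ definition above) =====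
theorem solve_spec : Claim_equal_solve := by
  intro c s _
  unfold Spec_solve solve solve_alt
  obtain ⟨h2, h3⟩ := solveLoop_char c s.toList 0 le_rfl (Or.inl rfl)
  have key : ((solveLoop c s.toList 0).2 && ((solveLoop c s.toList 0).1 == 0)) =
      ((prefixesB s.toList 0).all (fun p => decide (0 ≤ p ∧ p ≤ c)) &&
        ((prefixesB s.toList 0).isEmpty || (prefixesB s.toList 0).getLast? == some 0)) := by
    by_cases hv : (solveLoop c s.toList 0).2 = true
    · rw [← h2, hv, Bool.true_and, Bool.true_and, h3 hv, getLastD_zero_bool]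
    · have hv' : (solveLoop c s.toList 0).2 = false := by
        cases h : (solveLoop c s.toList 0).2 <;> simp_all
      rw [← h2, hv', Bool.false_and, Bool.false_and]
  simpa using congrArg (fun b => if b then "VALIDO" else "INVALIDO") key
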